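-- pv_equiv track=rewrite | github.com/atvKail/solve | USE/ПолноценноеРешениеВариантов/Основная11Июня2025/23.py | f
-- ===== SOURCE A (Python) =====
-- operations = [
--     lambda x: x - 1,
--     lambda x: x - 4,
--     lambda x: x // 3
-- ]
--
-- def f(x: int, ni8: bool = 1, i14: bool = 0) -> int:
--     if x == 2 and ni8 and i14:
--         return 1
--     if x < 2:
--         return 0
--     if x == 8:
--         ni8 &= 0
--     if x == 14:
--         i14 = 1
--     return sum(f(x=op(x), ni8=ni8, i14=i14) for op in operations)
-- ===== SOURCE B (Python) =====
-- def f(x: int, ni8: bool = 1, i14: bool = 0) -> int: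
--     # Bottom-up dynamic programming over (value, flag, flag) states, O(x) time.
--     tbl = {}
--     for v in range(2, x + 1):
--         for a in (False, True):
--             for b in (False, True):
--                 if v == 2 and a and b:
--                     r = 1
--                 else:
--                     na = a and v != 8
--                     nb = b or v == 14
--                     r = (tbl.get((v - 1, na, nb), 0)
--                          + tbl.get((v - 4, na, nb), 0)
--                          + tbl.get((v // 3, na, nb), 0))
--                 tbl[(v, a, b)] = r
--     return tbl.get((x, bool(ni8), bool(i14)), 0)
-- ===== Notes on version B (the rewrite author's own statement) =====
-- stated objective: faster
-- what changed: Replaced A's exponential three-way recursion by a bottom-up dynamic-programming table over (value, not-via-8 flag, via-14 flag) states, filled once from 2 up to x; Pre_ excludes only the large x on which A raises RecursionError.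
import Mathlib
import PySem

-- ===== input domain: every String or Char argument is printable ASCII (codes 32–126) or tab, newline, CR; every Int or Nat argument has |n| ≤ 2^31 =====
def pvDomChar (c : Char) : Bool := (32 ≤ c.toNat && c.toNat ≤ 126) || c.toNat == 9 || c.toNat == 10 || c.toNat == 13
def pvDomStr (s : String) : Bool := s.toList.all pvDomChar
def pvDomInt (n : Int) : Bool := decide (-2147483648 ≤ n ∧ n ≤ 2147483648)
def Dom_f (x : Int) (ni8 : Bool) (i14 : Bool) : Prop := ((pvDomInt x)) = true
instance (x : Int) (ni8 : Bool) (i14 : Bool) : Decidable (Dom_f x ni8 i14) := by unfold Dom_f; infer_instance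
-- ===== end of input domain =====

-- B replaces A's exponential three-way recursion by a bottom-up dynamic-programming
-- table over (value, flag, flag) states, filled once from 2 up to x.

-- ===== PORT A =====
def f (x : Int) (ni8 : Bool) (i14 : Bool) : Int :=
  if x = 2 ∧ ni8 ∧ i14 then 1
  else if _h : x < 2 then 0
  else
    let ni8' := if x = 8 then false else ni8
    let i14' := if x = 14 then true else i14
    f (x - 1) ni8' i14' + f (x - 4) ni8' i14' + f (PySem.Int.floordiv x 3) ni8' i14'
termination_by x.toNat
decreasing_by
  · omega
  · omega
  · rw [PySem.Int.floordiv_eq_ediv_of_pos (by omega)]; omega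

-- ===== PORT B =====
-- one iteration of B's outer loop: fill the four (flag, flag) table entries for value v
def fAltStep (t : PySem.Dict (Int × Bool × Bool) Int) (v : Int) :
    PySem.Dict (Int × Bool × Bool) Int :=
  [false, true].foldl (fun t a =>
    [false, true].foldl (fun t b =>
      let r : Int :=
        if v = 2 ∧ a = true ∧ b = true then 1
        else
          let na := a && !(v == 8)
          let nb := b || (v == 14)
          t.getD (v - 1, na, nb) 0 + t.getD (v - 4, na, nb) 0 +
            t.getD (PySem.Int.floordiv v 3, na, nb) 0
      t.insert (v, a, b) r) t) t

def f_alt (x : Int) (ni8 : Bool) (i14 : Bool) : Int :=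
  ((PySem.List.pyRange 2 (x + 1) 1).foldl fAltStep PySem.Dict.empty).getD (x, ni8, i14) 0

-- ===== PRECONDITION & SPEC =====
-- Pre_ excludes only large x on which Python A RAISES RecursionError: A's x-1 recursion
-- chain is about x frames deep (two frames per level), exceeding CPython's default
-- recursion limit from x = 497 in a fresh interpreter; the bound 450 leaves margin for
-- the caller's own stack depth. Below it A never raises.
def Pre_f (x : Int) (ni8 : Bool) (i14 : Bool) : Prop := x ≤ 450
instance (x : Int) (ni8 : Bool) (i14 : Bool) : Decidable (Pre_f x ni8 i14) := by unfold Pre_f; infer_instance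
def pvWitness_f : Int × Bool × Bool := (14, true, false)

def Spec_f (x : Int) (ni8 : Bool) (i14 : Bool) (out : Int) : Prop := out = f_alt x ni8 i14
instance (x : Int) (ni8 : Bool) (i14 : Bool) (out : Int) : Decidable (Spec_f x ni8 i14 out) := by unfold Spec_f; infer_instance

-- ===== CLAIM (what is proved, stated in full; the proofs are below) =====
def Claim_equal_f : Prop := ∀ (x : Int) (ni8 : Bool) (i14 : Bool), Dom_f x ni8 i14 → Pre_f x ni8 i14 → Spec_f x ni8 i14 (f x ni8 i14)

-- ===== LEMMAS AND PROOFS =====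

-- the table invariant: after processing values 2,…,n-1 the table holds f on them and nothing else
def TblInv (n : Int) (t : PySem.Dict (Int × Bool × Bool) Int) : Prop :=
  ∀ v a b, t.getD (v, a, b) 0 = if 2 ≤ v ∧ v < n then f v a b else 0

theorem f_of_lt_two (x : Int) (a b : Bool) (h : x < 2) : f x a b = 0 := by
  rw [f]
  have hx2 : ¬ (x = 2 ∧ a ∧ b) := by rintro ⟨h2, _⟩; omega
  simp [hx2, h]

theorem f_eq_of_ge_two (x : Int) (a b : Bool) (h : 2 ≤ x) :
    f x a b = if x = 2 ∧ a ∧ b then 1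
      else f (x - 1) (a && !(x == 8)) (b || (x == 14))
           + f (x - 4) (a && !(x == 8)) (b || (x == 14))
           + f (PySem.Int.floordiv x 3) (a && !(x == 8)) (b || (x == 14)) := by
  rw [f]
  have hlt : ¬ x < 2 := by omega
  have e1 : (if x = 8 then false else a) = (a && !(x == 8)) := by
    by_cases h8 : x = 8 <;> cases a <;> simp [h8]
  have e2 : (if x = 14 then true else b) = (b || (x == 14)) := by
    by_cases h14 : x = 14 <;> cases b <;> simp [h14]
  simp only [dif_neg hlt, e1, e2]

theorem floordiv_three_lt (x : Int) (h : 2 ≤ x) : PySem.Int.floordiv x 3 < x := by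
  rw [PySem.Int.floordiv_eq_ediv_of_pos (by omega)]; omega

theorem fAltStep_eq (n : Int) (t : PySem.Dict (Int × Bool × Bool) Int)
    (h2 : 2 ≤ n) (hval : ∀ (u : Int) (a b : Bool), u < n → t.getD (u, a, b) 0 = f u a b) :
    fAltStep t n =
      (((t.insert (n, false, false) (f n false false)).insert (n, false, true) (f n false true)).insert
          (n, true, false) (f n true false)).insert (n, true, true) (f n true true) := by
  have hr : ∀ a b : Bool,
      (if n = 2 ∧ a = true ∧ b = true then (1 : Int)
        else t.getD (n - 1, a && !(n == 8), b || (n == 14)) 0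
             + t.getD (n - 4, a && !(n == 8), b || (n == 14)) 0
             + t.getD (PySem.Int.floordiv n 3, a && !(n == 8), b || (n == 14)) 0)
      = f n a b := by
    intro a b
    rw [hval _ _ _ (by omega), hval _ _ _ (by omega),
        hval _ _ _ (floordiv_three_lt n h2), f_eq_of_ge_two n a b h2]
  have e1 : ∀ (a' b' a'' b'' : Bool),
      ((((n - 1 : Int), a', b') : Int × Bool × Bool) = (n, a'', b'')) = False := by
    intro _ _ _ _
    simp only [Prod.mk.injEq, eq_iff_iff, iff_false, not_and]
    intro h; omega
  have e4 : ∀ (a' b' a'' b'' : Bool),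
      ((((n - 4 : Int), a', b') : Int × Bool × Bool) = (n, a'', b'')) = False := by
    intro _ _ _ _
    simp only [Prod.mk.injEq, eq_iff_iff, iff_false, not_and]
    intro h; omega
  have ef : ∀ (a' b' a'' b'' : Bool),
      (((PySem.Int.floordiv n 3, a', b') : Int × Bool × Bool) = (n, a'', b'')) = False := by
    intro _ _ _ _
    have := floordiv_three_lt n h2
    simp only [Prod.mk.injEq, eq_iff_iff, iff_false, not_and]
    intro h; omega
  simp only [fAltStep, List.foldl_cons, List.foldl_nil, PySem.Dict.getD_insert,
    e1, e4, ef, if_false]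
  have h01 := hr false true
  have h10 := hr true false
  have h11 := hr true true
  simp only [eq_self_iff_true] at h01 h10 h11
  rw [hr false false, h01, h10, h11]

theorem fAltStep_inv (n : Int) (t : PySem.Dict (Int × Bool × Bool) Int)
    (h2 : 2 ≤ n) (hP : TblInv n t) : TblInv (n + 1) (fAltStep t n) := by
  have hval : ∀ (u : Int) (a b : Bool), u < n → t.getD (u, a, b) 0 = f u a b := by
    intro u a b hu
    rw [hP u a b]
    by_cases hge : 2 ≤ u
    · simp [hge, hu]
    · rw [f_of_lt_two u a b (by omega)]
      simp [hge]
  rw [fAltStep_eq n t h2 hval]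
  intro v a b
  simp only [PySem.Dict.getD_insert]
  by_cases hv : v = n
  · subst hv
    have htrue : (2 : Int) ≤ v ∧ v < v + 1 := ⟨h2, by omega⟩
    cases a <;> cases b <;> simp [htrue]
  · simp only [Prod.mk.injEq, hv, false_and, if_false]
    rw [hP v a b]
    by_cases hc : 2 ≤ v ∧ v < n
    · rw [if_pos hc, if_pos (show 2 ≤ v ∧ v < n + 1 from ⟨hc.1, by omega⟩)]
    · have hc' : ¬(2 ≤ v ∧ v < n + 1) := by
        intro c; exact hc ⟨c.1, by omega⟩
      rw [if_neg hc, if_neg hc']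

theorem tbl_inv (n : Int) (h : 2 ≤ n) :
    TblInv n ((PySem.List.pyRange 2 n 1).foldl fAltStep PySem.Dict.empty) := by
  induction n, h using Int.le_induction with
  | base =>
      rw [PySem.List.pyRange_one_eq_nil (by omega)]
      intro v a b
      have : ¬ (2 ≤ v ∧ v < 2) := by omega
      rw [List.foldl_nil, PySem.Dict.getD_empty, if_neg this]
  | succ n hn ih =>
      rw [PySem.List.pyRange_one_succ_right (by omega), List.foldl_append]
      exact fAltStep_inv n _ hn (ih)

theorem f_alt_eq_f (x : Int) (a b : Bool) : f_alt x a b = f x a b := by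
  unfold f_alt
  by_cases hx : 2 ≤ x
  · rw [tbl_inv (x + 1) (by omega) x a b]
    simp [hx, show x < x + 1 by omega]
  · rw [PySem.List.pyRange_one_eq_nil (by omega)]
    simp only [List.foldl_nil, PySem.Dict.getD_empty]
    rw [f_of_lt_two x a b (by omega)]

-- ===== VERDICT (by name: the statement is the Claim_ definition above) =====
theorem f_spec : Claim_equal_f := by
  intro x ni8 i14 _ _
  unfold Spec_f
  exact (f_alt_eq_f x ni8 i14).symm
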